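/- GENERATED by tools/from_farm_form.py from prooffarm-gif/accepted/DGifSlurp.E/Proof.lean (a worked proof of the farm's unit `DGifSlurp.E`,
   accepted by the verdict) — do not edit. -/
import Gif.Spec.Units.DGifSlurp_E
import Gif.Spec.AllSegs

open X86 X86.User Asan ProgX.Base ProgX.Base.Spec Gif.Spec

set_option maxRecDepth 4000
set_option maxHeartbeats 4000000

/-!
  `DGifSlurp.E` (10A8EDH … the `ret` at 10A913H, 11 instructions; dgif_lib.c:1324): THE EPILOGUE OF THE PROTECTED FUNCTION `DGifSlurp`.
  The recipe is that of farm.gif/worked/DGifGetWord.E (Gif/Spec/FrameCarry.lean §1, §2, §4), with TWO shadow-clearing stores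
  (`stores2_index`) and with the ghosts that change: the heap's invariant before the epilogue speaks of the PRESENT heap `Hc`, the
  entry's of `H`. `epilogue_same` of FrameCarry.lean wants ONE heap for both, so its two-heap form is proved here
  (`slurpE_epilogue_same`: the same proof, it only reads the stack part of the two invariants).
-/

namespace Gif.Spec.DGifSlurp_E

/-- **The frame's shadow span leaves the footprint, for two heaps**: `Gif.Spec.epilogue_same` with the entry's invariant about the
heap `H0` and the body's about the present heap `H1` (only `shadow.stack` of both is read: the clean stack at the entry, the active
own frame before the epilogue's stores). `m0` = the entry's memory, `m1` = the memory before the epilogue's stores. -/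
theorem slurpE_epilogue_same {H0 H1 : Heap} {rest : List Obj} {frames : List (Nat × FrameLayout)} {top top' ro ro' : Nat}
    {m0 m1 : Mem} {Fl : FrameLayout} {w : Span} {ws : List Span} (hro : Fl.raOff = ro) (hro' : Fl.raOff - Fl.size = ro')
    (hinv0 : HeapInv H0 rest frames (top + 8) m0) (hinv1 : HeapInv H1 rest ((top - ro, Fl) :: frames) top' m1)
    (hra : top % 8 = 0)
    (hsame : Mem.SameExcept (w :: shadowSpan (top - ro) (top - ro') :: ws) m0 m1) :
    Mem.SameExcept (w :: ws) m0 (storesMem m1 ((top - ro) / 8) Fl.epilogue) := by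
  subst hro
  subst hro'
  have hact := hinv1.shadow.stack.active (top - Fl.raOff, Fl) List.mem_cons_self
  simp only at hact
  obtain ⟨hF, hb8, hb1, hb2, hp⟩ := hact
  have hlo := hinv1.shadow.stack.lo
  have hc1 := FrameLayout.epilogue_clean hF hb8 hb2 hp
  have hc0 := hinv0.shadow.stack.clean
  obtain ⟨hs8, _, hein, _, _, _, _, _, hr8, hrs⟩ := hF
  have hg : (top - Fl.raOff) / 8 + Fl.size / 8 ≤ 0x200000 := by omega
  have h2 := storesMem_sameExcept m1 ((top - Fl.raOff) / 8) (Fl.size / 8) Fl.epilogue hein hg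
  intro a ha
  by_cases hin : 0xC00000 + (top - Fl.raOff) / 8 ≤ a.toNat ∧ a.toNat < 0xC00000 + (top - Fl.raOff) / 8 + Fl.size / 8
  · -- a shadow byte of the frame: 0 in both memories
    have ea : a = shadowAddr (a.toNat - 0xC00000) := eq_shadowAddr a _ (by omega)
    have z1 := hc1 (a.toNat - 0xC00000) (by omega) (by omega)
    have z0 := hc0 (a.toNat - 0xC00000) (by omega) (by omega)
    unfold shadowOf at z1 z0
    rw [← ea] at z1 z0
    apply UInt8.toNat_inj.mp
    rw [z1, z0]
  · -- any other byte: neither the epilogue's stores nor the function wrote it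
    have e2 : (storesMem m1 ((top - Fl.raOff) / 8) Fl.epilogue).read a = m1.read a := by
      apply h2 a
      intro x hx
      have e := List.mem_singleton.mp hx
      rw [e]
      simp only
      omega
    rw [e2]
    apply hsame a
    intro x hx
    rcases List.mem_cons.mp hx with e | hx'
    · rw [e]
      exact ha w List.mem_cons_self
    · rcases List.mem_cons.mp hx' with e | hx''
      · rw [e]
        unfold shadowSpan
        simp only
        omega
      · exact ha x (List.mem_cons_of_mem _ hx'')

end Gif.Spec.DGifSlurp_E

/-- The epilogue of `DGifSlurp` takes `Done` at 10A8EDH to the contract's `Returned` (for the heap `Hc` and the forest `Fc` of `Done`). -/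
theorem Gif.Spec.Proved.DGifSlurp_E_ok : Gif.Spec.DGifSlurp_E.Statement := by
  intro Lay hLay μ hμ u₀ hcode H rest frames F R Hc Fc e ret v hat
  -- 1. THE PRELUDE: the entry assertion `Done` = `At` (= `Core` + the present heap and forest) + `Complete`
  have hA := hat.at_
  have hcore := hA.core
  have he := hcore.entry
  v_entry he
  obtain ⟨henv, hrdi, hcomp⟩ := hcore.pre
  -- what the walker reads of a segment's entry state: rip, rsp (as `c_rsp`), the registers kept, the text, DF / MXCSR
  have w_rip := hcore.rip
  have c_rsp : v.reg .rsp = e.reg .rsp - 152 := hcore.rsp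
  have w_kept : RegsKept [.rsp] v v := RegsKept.refl _ _
  have w_eq : Mem.EqOn ProgX.Base.L.textLo ProgX.Base.L.textHi u₀.mem v.mem := ProgX.Base.conv_code_eqOn hcore.code
  have hdf := (show abiInv _ from hcore.abi).1
  have hmx := (show abiInv _ from hcore.abi).2
  have hsse := ProgX.Base.sseOK_of_abiInv hcore.abi
  -- the slots the six pops and the `ret` read
  have k_r15 : v.mem.readLE (e.reg .rsp - 8) 8 = (e.reg .r15).toNat := hcore.slot_r15
  have k_r14 : v.mem.readLE (e.reg .rsp - 16) 8 = (e.reg .r14).toNat := hcore.slot_r14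
  have k_r13 : v.mem.readLE (e.reg .rsp - 24) 8 = (e.reg .r13).toNat := hcore.slot_r13
  have k_r12 : v.mem.readLE (e.reg .rsp - 32) 8 = (e.reg .r12).toNat := hcore.slot_r12
  have k_rbp : v.mem.readLE (e.reg .rsp - 40) 8 = (e.reg .rbp).toNat := hcore.slot_rbp
  have k_rbx : v.mem.readLE (e.reg .rsp - 48) 8 = (e.reg .rbx).toNat := hcore.slot_rbx
  have k_ra : UInt64.ofNat (v.mem.readLE (e.reg .rsp) 8) = ret := hcore.slot_ra
  -- THE SHADOW INDEX REGISTER `r14` AS A VARIABLE `b` WITH BOUNDS: no `>>> 3` is in the walk's context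
  have e152 : (e.reg .rsp - 152).toNat = (e.reg .rsp).toNat - 152 := by u_omega
  obtain ⟨b, hb⟩ : ∃ b : Word, b = (e.reg .rsp - 152) >>> 3 := ⟨_, rfl⟩
  have hbn : b.toNat = ((e.reg .rsp).toNat - 152) / 8 := by
    rw [hb, Asan.toNat_shr3, e152]
  have hb1 : 0xE0000 ≤ b.toNat := by omega
  have hb2 : b.toNat + 12 ≤ 0x100000 := by omega
  have c_r14 : v.reg .r14 = b := by
    rw [hb]
    exact hcore.r14
  clear hb
  -- 2. THE WALK, 10A8EDH … over the `ret` at 10A913H: no side goal is left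
  u_walk hcode [hμ.vendor] span [ProgX.Base.L.textLo, ProgX.Base.L.textHi] side (v_side)
  -- 3. THE EPILOGUE'S TWO STORES AS THE LAYOUT'S `storesMem`: per store the displacement as the walker prints it, granule offset, width, value
  have hepi : Gif.Frames.DGifSlurp.epilogue = [⟨0, 8, 0⟩, ⟨8, 4, 0⟩] := rfl
  have hmem : s_10a913.mem = storesMem v.mem (((e.reg .rsp).toNat - 152) / 8) Gif.Frames.DGifSlurp.epilogue := by
    rw [hepi, w_mem, ← hbn]
    exact stores2_index v.mem b 12582912 12582920 0 8 0 8 4 0 (by omega) (by decide) (by decide) (by decide) (by decide)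
  clear w_mem
  -- 4. THE ENVIRONMENT behind the epilogue, for the PRESENT heap `Hc` and forest `Fc`: the callers' frames, the clean stack ends
  --    above the return address
  obtain ⟨hinv2, hok2, hrem2⟩ := after_epilogue (top := (e.reg .rsp).toNat) (ro := 152) (Fl := Gif.Frames.DGifSlurp) rfl
    hA.inv henv.ctx hA.ok he_align he_top henv.heap.inv.frames_above
  -- the frame's shadow span leaves the footprint (the entry's invariant speaks of `H`, the body's of `Hc`)
  have hsame2 := Gif.Spec.DGifSlurp_E.slurpE_epilogue_same (top := (e.reg .rsp).toNat) (ro := 152) (ro' := 56)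
    (Fl := Gif.Frames.DGifSlurp) rfl rfl henv.heap.inv hA.inv he_align hcore.same
  rw [← hmem] at hinv2 hok2 hrem2 hsame2
  -- 5. `Returned`, field by field
  refine ReachVia.done ?_
  refine X86.User.Returned.mk w_rip w_rsp ?saved ?same (ProgX.Base.conv_code_in w_eq) ?abi ?post
  case saved =>
    -- all six callee-saved registers were pushed by the prologue and are popped back: the walker's facts
    intro r hr
    cases r <;> first
      | exact absurd hr (by decide)
      | (with_reducible assumption)
  case same =>
    simp only [X86.User.Spec.footprint, vspec]
    exact hsame2
  case abi =>
    -- DF and MXCSR by hand (`v_inv` is slow behind a walk with shadow stores)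
    refine ProgX.Base.abiInv_of ?_ ?_
    · rw [w_flags]
      simp only [X86.User.df_setStatus]
      exact hdf
    · rw [w_mxcsr]
      exact hmx
  case post =>
    -- `Back2` for the heap and the forest of `Done` (the reader did not go back), the two equations of the forest, `Complete`
    refine ⟨Hc, Fc, ⟨hA.region, hinv2, hok2, ?_⟩, hA.gif, hA.pv, hat.complete⟩
    rw [hrem2]
    exact hcore.rem
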